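-- pv_equiv track=rewrite | github.com/dgelok/pythonExercises | algorithms/try2.py | stringAnagram
-- ===== SOURCE A (Python) =====
-- def stringAnagram(dictionary, query):
--     # Write your code here
--     answer = []
--     alphaQuery = []
--     alphaDict = []
--     for n in query:
--         alphaItem = ''.join(sorted(n))
--         alphaQuery.append(alphaItem)
--
--     for m in dictionary:
--         alphaDictItem = ''.join(sorted(m))
--         alphaDict.append(alphaDictItem)
--
--     answerDict = {}
--
--     for i in alphaQuery:
--         answerDict.update({i: 0})
--
--     for j in alphaDict:
--         if j in answerDict:
--             answerDict[j] += 1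
--
--     answer = []
--     for l in alphaQuery:
--         answer.append(answerDict[l])
--
--     return answer
-- ===== SOURCE B (Python) =====
-- def stringAnagram(dictionary, query):
--     # Sort the dictionary's anagram signatures once; answer each query with two
--     # hand-written binary searches (lower/upper bound): the count of a query's
--     # signature in the sorted array is upper_bound - lower_bound.
--     sigs = sorted(''.join(sorted(w)) for w in dictionary)
--     n = len(sigs)
--     answer = []
--     for q in query:
--         s = ''.join(sorted(q))
--         lo, hi = 0, n                 # lower bound: first index with sigs[i] >= s
--         while lo < hi:
--             mid = (lo + hi) // 2
--             if sigs[mid] < s: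
--                 lo = mid + 1
--             else:
--                 hi = mid
--         left = lo
--         lo, hi = left, n              # upper bound: first index with sigs[i] > s
--         while lo < hi:
--             mid = (lo + hi) // 2
--             if s < sigs[mid]:
--                 hi = mid
--             else:
--                 lo = mid + 1
--         answer.append(lo - left)
--     return answer
-- ===== Notes on version B (the rewrite author's own statement) =====
-- stated objective: alternative
-- what changed: B replaces A's hash-dict counting (seed a dict with query signatures, bump counts while scanning the dictionary, read the dict back) with a sorted array of the dictionary's anagram signatures queried by two hand-written binary searches per query (count = upper_bound - lower_bound).
import Mathlib
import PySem

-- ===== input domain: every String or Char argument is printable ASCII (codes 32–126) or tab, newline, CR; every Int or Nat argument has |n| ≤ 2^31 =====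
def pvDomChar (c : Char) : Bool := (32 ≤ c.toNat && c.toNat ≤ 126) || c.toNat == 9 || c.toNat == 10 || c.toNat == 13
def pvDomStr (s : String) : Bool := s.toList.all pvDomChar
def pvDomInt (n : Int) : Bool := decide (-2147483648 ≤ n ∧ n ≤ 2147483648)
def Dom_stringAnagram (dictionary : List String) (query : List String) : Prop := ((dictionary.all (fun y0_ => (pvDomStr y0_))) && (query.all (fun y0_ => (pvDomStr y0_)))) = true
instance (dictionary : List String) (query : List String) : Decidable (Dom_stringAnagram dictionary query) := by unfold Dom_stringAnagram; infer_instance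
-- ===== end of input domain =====

-- B replaces A's hash-dict counting passes with a sorted array of the dictionary's anagram
-- signatures queried by two hand-written binary searches (alternative data structure; return value only).

-- ''.join(sorted(s)) — the anagram signature both programs compute per word
def pvSig (s : String) : String := String.ofList (PySem.List.sorted s.toList (fun c => c) false)

-- ===== PORT A =====
def stringAnagram (dictionary : List String) (query : List String) : List Int :=
  let alphaQuery := query.foldl (fun acc n => acc ++ [pvSig n]) []
  let alphaDict := dictionary.foldl (fun acc m => acc ++ [pvSig m]) []
  let answerDict : PySem.Dict String Int :=
    alphaQuery.foldl (fun d i => d.insert i 0) PySem.Dict.empty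
  let answerDict2 :=
    alphaDict.foldl (fun d j => if d.contains j then d.insert j (d.getD j 0 + 1) else d) answerDict
  alphaQuery.foldl (fun acc l => acc ++ [answerDict2.getD l 0]) []

-- ===== PORT B =====
-- Source B's first while loop: lower bound (first index with sigs[i] >= s); fuel ≥ hi - lo
-- (sigs[mid] is always in range in Source B; .getD with "" only makes the same lookup total)
def pvLowerLoop (sigs : List String) (s : String) : Nat → Nat → Nat → Nat
  | 0, lo, _ => lo
  | fuel+1, lo, hi =>
    if lo < hi then
      let mid := (lo + hi) / 2
      if sigs.getD mid "" < s then pvLowerLoop sigs s fuel (mid + 1) hi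
      else pvLowerLoop sigs s fuel lo mid
    else lo

-- Source B's second while loop: upper bound (first index with sigs[i] > s)
def pvUpperLoop (sigs : List String) (s : String) : Nat → Nat → Nat → Nat
  | 0, lo, _ => lo
  | fuel+1, lo, hi =>
    if lo < hi then
      let mid := (lo + hi) / 2
      if s < sigs.getD mid "" then pvUpperLoop sigs s fuel lo mid
      else pvUpperLoop sigs s fuel (mid + 1) hi
    else lo

def stringAnagram_alt (dictionary : List String) (query : List String) : List Int :=
  let sigs := PySem.List.sorted (dictionary.map pvSig) (fun x => x) false
  let n := sigs.length
  query.foldl (fun answer q =>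
    let s := pvSig q
    let left := pvLowerLoop sigs s n 0 n
    let upper := pvUpperLoop sigs s n left n
    answer ++ [(upper : Int) - (left : Int)]) []

-- ===== PRECONDITION & SPEC =====
def Spec_stringAnagram (dictionary : List String) (query : List String) (out : List Int) : Prop := out = stringAnagram_alt dictionary query
instance (dictionary : List String) (query : List String) (out : List Int) : Decidable (Spec_stringAnagram dictionary query out) := by unfold Spec_stringAnagram; infer_instance

-- ===== CLAIM (what is proved, stated in full; the proofs are below) =====
def Claim_equal_stringAnagram : Prop := ∀ (dictionary : List String) (query : List String), Dom_stringAnagram dictionary query → Spec_stringAnagram dictionary query (stringAnagram dictionary query)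

-- ===== LEMMAS AND PROOFS =====

-- A-side: seeding loop — every value in answerDict is 0
theorem pv_getD_seed (xs : List String) (d0 : PySem.Dict String Int)
    (h : ∀ k, d0.getD k 0 = 0) (k : String) :
    (xs.foldl (fun d i => d.insert i 0) d0).getD k 0 = 0 := by
  induction xs generalizing d0 with
  | nil => exact h k
  | cons i xs ih =>
      refine ih _ (fun k' => ?_)
      simp [PySem.Dict.getD_insert]
      intro _; exact h k'

-- A-side: seeding loop — every seeded key is present
theorem pv_contains_seed (xs : List String) (d0 : PySem.Dict String Int) (k : String)
    (h : k ∈ xs ∨ d0.contains k) :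
    (xs.foldl (fun d i => d.insert i 0) d0).contains k := by
  induction xs generalizing d0 with
  | nil => simpa using h.resolve_left (by simp)
  | cons i xs ih =>
      refine ih _ ?_
      rcases h with h | h
      · rcases List.mem_cons.mp h with h | h
        · right; simp [h]
        · left; exact h
      · right; simp [PySem.Dict.contains_insert, h]

-- A-side: counting loop — a contained key's value gains the count of its occurrences
theorem pv_count_loop (xs : List String) (d0 : PySem.Dict String Int) (s : String)
    (hs : d0.contains s) :
    (xs.foldl (fun d j => if d.contains j then d.insert j (d.getD j 0 + 1) else d) d0).getD s 0
      = d0.getD s 0 + xs.count s := by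
  induction xs generalizing d0 with
  | nil => simp
  | cons j xs ih =>
      simp only [List.foldl_cons]
      by_cases hj : d0.contains j
      · rw [if_pos hj, ih _ (by simp [PySem.Dict.contains_insert, hs])]
        by_cases hjs : j = s
        · subst hjs
          simp
          ring
        · simp [PySem.Dict.getD_insert, hjs, Ne.symm hjs]
      · rw [if_neg hj, ih _ hs]
        have hjs : j ≠ s := fun h => hj (h ▸ hs)
        simp [List.count_cons]
        exact hjs

-- A computes, per query, the number of dictionary signatures equal to the query's signature
theorem stringAnagram_eq_counts (dictionary query : List String) :
    stringAnagram dictionary query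
      = query.map (fun q => ((dictionary.map pvSig).count (pvSig q) : Int)) := by
  unfold stringAnagram
  simp only [PySem.List.foldl_append_singleton_eq_map, List.nil_append, List.map_map]
  refine List.map_congr_left (fun q hq => ?_)
  simp only [Function.comp]
  rw [pv_count_loop _ _ _ (pv_contains_seed _ _ _ (Or.inl (List.mem_map_of_mem hq)))]
  rw [pv_getD_seed _ _ (fun k => by simp [PySem.Dict.getD_empty])]
  simp

-- B-side: a sorted list read through getD is monotone in the index
theorem pv_sorted_mono (sigs : List String) (hp : sigs.Pairwise (· ≤ ·))
    {i j : Nat} (hij : i ≤ j) (hj : j < sigs.length) :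
    sigs.getD i "" ≤ sigs.getD j "" := by
  rcases Nat.lt_or_ge i j with h | h
  · have := List.pairwise_iff_getElem.mp hp i j (lt_trans h hj) hj h
    simpa [List.getD_eq_getElem?_getD, List.getElem?_eq_getElem, lt_trans h hj, hj] using this
  · have : i = j := le_antisymm hij h
    simp [this]

-- B-side: the lower-bound loop lands exactly on the <s / ≥s frontier
theorem pvLowerLoop_spec (sigs : List String) (s : String) (hp : sigs.Pairwise (· ≤ ·)) :
    ∀ (fuel lo hi : Nat), lo ≤ hi → hi ≤ sigs.length → hi - lo ≤ fuel →
    (∀ j, j < lo → sigs.getD j "" < s) →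
    (∀ j, hi ≤ j → j < sigs.length → s ≤ sigs.getD j "") →
    lo ≤ pvLowerLoop sigs s fuel lo hi ∧ pvLowerLoop sigs s fuel lo hi ≤ hi ∧
    (∀ j, j < pvLowerLoop sigs s fuel lo hi → sigs.getD j "" < s) ∧
    (∀ j, pvLowerLoop sigs s fuel lo hi ≤ j → j < sigs.length → s ≤ sigs.getD j "") := by
  intro fuel
  induction fuel with
  | zero =>
      intro lo hi hlh hhn hf hlow hhigh
      have : lo = hi := by omega
      subst this
      exact ⟨le_refl _, le_refl _, hlow, hhigh⟩
  | succ fuel ih =>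
      intro lo hi hlh hhn hf hlow hhigh
      by_cases h : lo < hi
      · simp only [pvLowerLoop, if_pos h]
        set mid := (lo + hi) / 2 with hmid
        have hmlo : lo ≤ mid := by omega
        have hmhi : mid < hi := by omega
        by_cases hc : sigs.getD mid "" < s
        · simp only [if_pos hc]
          refine (ih (mid+1) hi (by omega) hhn (by omega) ?_ hhigh).imp (by omega) id
          intro j hj
          exact lt_of_le_of_lt (pv_sorted_mono sigs hp (by omega) (by omega)) hc
        · simp only [if_neg hc]
          refine (ih lo mid (by omega) (by omega) (by omega) hlow ?_).imp id (fun x => x.imp (by omega) id)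
          intro j hj hjn
          exact le_trans (le_of_not_gt hc) (pv_sorted_mono sigs hp hj hjn)
      · simp only [pvLowerLoop, if_neg h]
        have : lo = hi := by omega
        subst this
        exact ⟨le_refl _, le_refl _, hlow, hhigh⟩

-- B-side: the upper-bound loop lands exactly on the ≤s / >s frontier
theorem pvUpperLoop_spec (sigs : List String) (s : String) (hp : sigs.Pairwise (· ≤ ·)) :
    ∀ (fuel lo hi : Nat), lo ≤ hi → hi ≤ sigs.length → hi - lo ≤ fuel →
    (∀ j, j < lo → sigs.getD j "" ≤ s) →
    (∀ j, hi ≤ j → j < sigs.length → s < sigs.getD j "") →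
    lo ≤ pvUpperLoop sigs s fuel lo hi ∧ pvUpperLoop sigs s fuel lo hi ≤ hi ∧
    (∀ j, j < pvUpperLoop sigs s fuel lo hi → sigs.getD j "" ≤ s) ∧
    (∀ j, pvUpperLoop sigs s fuel lo hi ≤ j → j < sigs.length → s < sigs.getD j "") := by
  intro fuel
  induction fuel with
  | zero =>
      intro lo hi hlh hhn hf hlow hhigh
      have : lo = hi := by omega
      subst this
      exact ⟨le_refl _, le_refl _, hlow, hhigh⟩
  | succ fuel ih =>
      intro lo hi hlh hhn hf hlow hhigh
      by_cases h : lo < hi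
      · simp only [pvUpperLoop, if_pos h]
        set mid := (lo + hi) / 2 with hmid
        have hmlo : lo ≤ mid := by omega
        have hmhi : mid < hi := by omega
        by_cases hc : s < sigs.getD mid ""
        · simp only [if_pos hc]
          refine (ih lo mid (by omega) (by omega) (by omega) hlow ?_).imp id (fun x => x.imp (by omega) id)
          intro j hj hjn
          exact lt_of_lt_of_le hc (pv_sorted_mono sigs hp hj hjn)
        · simp only [if_neg hc]
          refine (ih (mid+1) hi (by omega) hhn (by omega) ?_ hhigh).imp (by omega) id
          intro j hj
          exact le_trans (pv_sorted_mono sigs hp (by omega) (by omega)) (le_of_not_gt hc)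
      · simp only [pvUpperLoop, if_neg h]
        have : lo = hi := by omega
        subst this
        exact ⟨le_refl _, le_refl _, hlow, hhigh⟩

-- a predicate true exactly on the first r positions has countP r
theorem pv_countP_of_split (sigs : List String) (p : String → Bool) (r : Nat) (hr : r ≤ sigs.length)
    (h1 : ∀ j, j < r → p (sigs.getD j "") = true)
    (h2 : ∀ j, r ≤ j → j < sigs.length → p (sigs.getD j "") = false) :
    sigs.countP p = r := by
  have hsplit : sigs = sigs.take r ++ sigs.drop r := (List.take_append_drop r sigs).symm
  rw [hsplit, List.countP_append]
  have ht : (sigs.take r).countP p = (sigs.take r).length := by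
    rw [List.countP_eq_length]
    intro a ha
    rcases List.mem_iff_getElem.mp ha with ⟨i, hi, rfl⟩
    have hir : i < r := lt_of_lt_of_le hi (by simp)
    have hin : i < sigs.length := by simp at hi; omega
    rw [List.getElem_take]
    have := h1 i hir
    simpa [List.getD_eq_getElem?_getD, List.getElem?_eq_getElem, hin] using this
  have hd : (sigs.drop r).countP p = 0 := by
    rw [List.countP_eq_zero]
    intro a ha
    rcases List.mem_iff_getElem.mp ha with ⟨i, hi, rfl⟩
    have hin : r + i < sigs.length := by simp at hi; omega
    rw [List.getElem_drop]
    have := h2 (r + i) (by omega) hin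
    simpa [List.getD_eq_getElem?_getD, List.getElem?_eq_getElem, hin] using this
  rw [ht, hd, List.length_take, Nat.add_zero]
  omega

-- count = countP(<= s) - countP(< s), for any linearly ordered element type
theorem pv_count_eq_sub {A : Type} [LinearOrder A] (sigs : List A) (s : A) :
    sigs.count s = sigs.countP (fun y => decide (y ≤ s)) - sigs.countP (fun y => decide (y < s)) := by
  induction sigs with
  | nil => simp
  | cons a t ih =>
      have hle : t.countP (fun y => decide (y < s)) ≤ t.countP (fun y => decide (y ≤ s)) :=
        List.countP_mono_left (fun y _ hy => by
          simp only [decide_eq_true_eq] at *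
          exact le_of_lt hy)
      rw [List.count_cons, List.countP_cons, List.countP_cons, ih]
      rcases lt_trichotomy a s with h | h | h
      · rw [if_neg (by simp [ne_of_lt h]), if_pos (by simp [le_of_lt h]), if_pos (by simp [h])]
        omega
      · subst h
        rw [if_pos (by simp), if_pos (by simp), if_neg (by simp)]
        omega
      · rw [if_neg (by simp [ne_of_gt h]), if_neg (by simp [not_le.mpr h]),
            if_neg (by simp [not_lt.mpr (le_of_lt h)])]
        omega

-- B computes, per query, the same signature count via the two binary searches
theorem stringAnagram_alt_eq_counts (dictionary query : List String) :
    stringAnagram_alt dictionary query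
      = query.map (fun q => ((dictionary.map pvSig).count (pvSig q) : Int)) := by
  unfold stringAnagram_alt
  simp only [PySem.List.foldl_append_singleton_eq_map, List.nil_append]
  refine List.map_congr_left (fun q _ => ?_)
  set sigs := PySem.List.sorted (dictionary.map pvSig) (fun x => x) false with hsigs
  set s := pvSig q with hs
  have hp : sigs.Pairwise (· ≤ ·) := PySem.List.sorted_pairwise (dictionary.map pvSig) (fun x => x)
  obtain ⟨-, hlleft, hlt, hge⟩ :=
    pvLowerLoop_spec sigs s hp sigs.length 0 sigs.length (Nat.zero_le _) (le_refl _) (by omega)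
      (fun j hj => absurd hj (Nat.not_lt_zero j)) (fun j hj hjn => absurd hjn (by omega))
  set left := pvLowerLoop sigs s sigs.length 0 sigs.length with hleft
  obtain ⟨hlu, hur, hle, hgt⟩ :=
    pvUpperLoop_spec sigs s hp sigs.length left sigs.length hlleft (le_refl _) (by omega)
      (fun j hj => le_of_lt (hlt j hj)) (fun j hj hjn => absurd hjn (by omega))
  set upper := pvUpperLoop sigs s sigs.length left sigs.length with hupper
  have hcl : sigs.countP (fun y => decide (y < s)) = left :=
    pv_countP_of_split sigs _ left hlleft
      (fun j hj => decide_eq_true (hlt j hj))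
      (fun j hj hjn => decide_eq_false (not_lt.mpr (hge j hj hjn)))
  have hcr : sigs.countP (fun y => decide (y ≤ s)) = upper :=
    pv_countP_of_split sigs _ upper hur
      (fun j hj => decide_eq_true (hle j hj))
      (fun j hj hjn => decide_eq_false (not_le.mpr (hgt j hj hjn)))
  have hcount : sigs.count s = upper - left := by
    rw [pv_count_eq_sub sigs s, hcl, hcr]
  have hperm : (dictionary.map pvSig).count s = sigs.count s :=
    ((PySem.List.sorted_perm (dictionary.map pvSig) (fun x => x) false).count_eq s).symm
  rw [hperm, hcount]
  omega

-- ===== VERDICT (by name: the statement is the Claim_ definition above) =====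
theorem stringAnagram_spec : Claim_equal_stringAnagram := by
  intro dictionary query _
  unfold Spec_stringAnagram
  rw [stringAnagram_eq_counts, stringAnagram_alt_eq_counts]
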